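-- pv_equiv track=rewrite | github.com/IliasN/aoc2020 | Day17/part2.py | generate_space
-- ===== SOURCE A (Python) =====
-- def generate_space(grid: list, limit: int) -> list:
--     width = len(grid[0]) + 2 * limit
--     height = len(grid) + 2 * limit
--     depth = 1 + 2 * limit
--     space = [[[["." for _ in range(depth)] for z in range(depth)] for x in range(width)] for y in range(height)]
--     for j in range(len(grid)):
--         for i in range(len(grid[0])):
--             space[j + limit][i + limit][limit][limit] = grid[j][i]
--     return space
-- ===== SOURCE B (Python) =====
-- def generate_space(grid: list, limit: int) -> list:
--     w0 = len(grid[0])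
--     depth = 1 + 2 * limit
--
--     def plane():  # an all-"." z/w slab
--         return [["."] * depth for _ in range(depth)]
--
--     def slab(v):  # a z/w slab with v at its centre
--         return ([["."] * depth for _ in range(limit)]
--                 + [["."] * limit + [v] + ["."] * limit]
--                 + [["."] * depth for _ in range(limit)])
--
--     def pad_row():  # a full row of empty slabs
--         return [plane() for _ in range(w0 + 2 * limit)]
--
--     def mid_row(row):  # limit empty slabs, the row's slabs, limit empty slabs
--         return ([plane() for _ in range(limit)]
--                 + [slab(row[i]) for i in range(w0)]
--                 + [plane() for _ in range(limit)])
--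
--     return ([pad_row() for _ in range(limit)]
--             + [mid_row(row) for row in grid]
--             + [pad_row() for _ in range(limit)])
-- ===== Notes on version B (the rewrite author's own statement) =====
-- stated objective: alternative
-- what changed: A allocates a full all-'.' 4D array by scanning every coordinate and then mutates the centre cells in a second pass of index assignments; B performs no coordinate scan or mutation at all: it assembles the space by concatenating replicated padding blocks (pad rows, pad columns, per-cell z/w slabs built as pad-slices around each grid value).
-- outside the precondition, e.g. on generate_space([[]], -1): A returns [], B returns [[]]
import Mathlib
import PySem

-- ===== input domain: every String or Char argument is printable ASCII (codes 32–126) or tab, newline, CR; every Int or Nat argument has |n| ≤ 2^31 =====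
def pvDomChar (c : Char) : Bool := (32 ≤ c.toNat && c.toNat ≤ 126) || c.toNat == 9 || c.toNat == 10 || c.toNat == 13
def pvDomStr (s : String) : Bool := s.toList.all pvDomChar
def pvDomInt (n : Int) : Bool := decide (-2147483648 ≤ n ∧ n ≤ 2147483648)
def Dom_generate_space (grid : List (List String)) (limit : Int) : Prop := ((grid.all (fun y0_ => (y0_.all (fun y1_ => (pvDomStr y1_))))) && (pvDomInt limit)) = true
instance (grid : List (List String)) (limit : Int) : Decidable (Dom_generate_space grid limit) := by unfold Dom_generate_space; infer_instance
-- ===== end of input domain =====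

-- B replaces A's scan-and-overwrite (allocate an all-"." 4D array over every coordinate, then
-- mutate the centre cells by index assignment) by pure block concatenation: the space is
-- assembled from replicated padding blocks spliced around the grid values, with no coordinate
-- scan and no mutation (objective: alternative algorithmic decomposition, same cost).

-- ===== PORT A =====
-- Python's `space[a][b][c][d] = v` functionally: modify at index a (negative = from the end);
-- an out-of-range index raises IndexError in Python (excluded by Pre_), here a no-op.
def pyNormIdx (len : Nat) (i : Int) : Int := if i < 0 then i + len else i
def pyModifyAt {α : Type} (xs : List α) (i : Int) (f : α → α) : List α :=
  if 0 ≤ pyNormIdx xs.length i ∧ pyNormIdx xs.length i < xs.length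
  then xs.modify (pyNormIdx xs.length i).toNat f else xs

def generate_space (grid : List (List String)) (limit : Int) : List (List (List (List String))) :=
  match PySem.List.pyGet? grid 0 with
  | none => []   -- grid[0] raises IndexError on empty grid (excluded by Pre_)
  | some row0 =>
    let width : Int := (row0.length : Int) + 2 * limit
    let height : Int := (grid.length : Int) + 2 * limit
    let depth : Int := 1 + 2 * limit
    let space : List (List (List (List String))) :=
      (PySem.List.pyRange 0 height 1).map (fun _y =>
        (PySem.List.pyRange 0 width 1).map (fun _x =>
          (PySem.List.pyRange 0 depth 1).map (fun _z =>
            (PySem.List.pyRange 0 depth 1).map (fun _w => "."))))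
    (PySem.List.pyRange 0 (grid.length : Int) 1).foldl (fun sp j =>
      (PySem.List.pyRange 0 (row0.length : Int) 1).foldl (fun sp i =>
        pyModifyAt sp (j + limit) (fun a =>
          pyModifyAt a (i + limit) (fun b =>
            pyModifyAt b limit (fun c =>
              PySem.List.pySetD c limit
                (PySem.List.pyGetD (PySem.List.pyGetD grid j []) i "."))))) sp) space

-- ===== PORT B =====
-- Transliteration of Source B: pure block concatenation. `["x"] * k` is List.replicate k.toNat /
-- List.range of the clamped count (Python's list repetition is empty for k ≤ 0 — exact).
def generate_space_alt (grid : List (List String)) (limit : Int) : List (List (List (List String))) :=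
  match PySem.List.pyGet? grid 0 with
  | none => []   -- len(grid[0]) raises IndexError on empty grid (excluded by Pre_)
  | some row0 =>
    let w0 : Nat := row0.length
    let depth : Nat := (1 + 2 * limit).toNat
    let L : Nat := limit.toNat
    let plane : List (List String) :=
      (List.range depth).map (fun _ => List.replicate depth ".")
    let slab : String → List (List String) := fun v =>
      (List.range L).map (fun _ => List.replicate depth ".")
        ++ [List.replicate L "." ++ [v] ++ List.replicate L "."]
        ++ (List.range L).map (fun _ => List.replicate depth ".")
    let padRow : List (List (List String)) :=
      (List.range (((w0 : Int) + 2 * limit).toNat)).map (fun _ => plane)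
    let midRow : List String → List (List (List String)) := fun row =>
      (List.range L).map (fun _ => plane)
        ++ (List.range w0).map (fun i => slab (PySem.List.pyGetD row (Int.ofNat i) "."))
        ++ (List.range L).map (fun _ => plane)
    (List.range L).map (fun _ => padRow) ++ grid.map midRow
      ++ (List.range L).map (fun _ => padRow)

-- ===== PRECONDITION & SPEC =====
-- Pre_ requires a nonnegative limit (the padding amount; negative padding is outside the
-- task's natural domain: there A either raises IndexError, or — only when the first row is
-- empty — returns a degenerately-shaped value via negative ranges), a nonempty grid (grid[0]
-- raises IndexError on []), and no row shorter than the first (grid[j][i] raises IndexError).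
def Pre_generate_space (grid : List (List String)) (limit : Int) : Prop :=
  grid ≠ [] ∧ 0 ≤ limit ∧ ∀ row ∈ grid, (grid.headD []).length ≤ row.length
instance (grid : List (List String)) (limit : Int) : Decidable (Pre_generate_space grid limit) := by
  unfold Pre_generate_space; infer_instance

def pvWitness_generate_space : List (List String) × Int := ([[".", "#"], ["#", "."]], 1)

def Spec_generate_space (grid : List (List String)) (limit : Int) (out : List (List (List (List String)))) : Prop := out = generate_space_alt grid limit
instance (grid : List (List String)) (limit : Int) (out : List (List (List (List String)))) : Decidable (Spec_generate_space grid limit out) := by unfold Spec_generate_space; infer_instance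

-- ===== CLAIM (what is proved, stated in full; the proofs are below) =====
def Claim_equal_generate_space : Prop := ∀ (grid : List (List String)) (limit : Int), Dom_generate_space grid limit → Pre_generate_space grid limit → Spec_generate_space grid limit (generate_space grid limit)

-- ===== LEMMAS AND PROOFS =====

theorem pyNormIdx_of_nonneg (len : Nat) (i : Int) (h0 : 0 ≤ i) : pyNormIdx len i = i := by
  simp only [pyNormIdx]; rw [if_neg (by omega)]

theorem pyModifyAt_in {α : Type} (xs : List α) (i : Int) (f : α → α)
    (h0 : 0 ≤ i) (h1 : i < xs.length) :
    pyModifyAt xs i f = xs.modify i.toNat f := by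
  simp only [pyModifyAt, pyNormIdx_of_nonneg _ _ h0]
  rw [if_pos ⟨h0, h1⟩]

theorem pyModifyAt_id {α : Type} (xs : List α) (i : Int) :
    pyModifyAt xs i (fun a => a) = xs := by
  simp only [pyModifyAt]; split
  · exact List.modify_id _ _
  · rfl

theorem modify_modify_self {α : Type} (l : List α) (k : Nat) (f g : α → α) :
    (l.modify k f).modify k g = l.modify k (fun a => g (f a)) := by
  apply List.ext_getElem
  · simp
  · intro i h1 h2
    simp only [List.getElem_modify]
    split <;> rfl

theorem pyModifyAt_comp {α : Type} (xs : List α) (e : Int) (g1 g2 : α → α) :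
    pyModifyAt (pyModifyAt xs e g1) e g2 = pyModifyAt xs e (fun a => g2 (g1 a)) := by
  by_cases h : 0 ≤ pyNormIdx xs.length e ∧ pyNormIdx xs.length e < xs.length
  · have h1 : pyModifyAt xs e g1 = xs.modify (pyNormIdx xs.length e).toNat g1 := by
      simp only [pyModifyAt, if_pos h]
    rw [h1]
    simp only [pyModifyAt, List.length_modify, if_pos h]
    exact modify_modify_self _ _ _ _
  · simp only [pyModifyAt, if_neg h]

theorem foldl_pyModifyAt {α ι : Type} (is : List ι) (xs : List α) (e : Int) (g : ι → α → α) :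
    is.foldl (fun s i => pyModifyAt s e (g i)) xs
      = pyModifyAt xs e (fun a => is.foldl (fun a i => g i a) a) := by
  induction is generalizing xs with
  | nil => simp [pyModifyAt_id]
  | cons i is ih => simp only [List.foldl_cons, ih, pyModifyAt_comp]

theorem modify_map_range {α : Type} (H k : Nat) (f : Nat → α) (g : α → α) (hk : k < H) :
    ((List.range H).map f).modify k g
      = (List.range H).map (fun y => if y = k then g (f y) else f y) := by
  apply List.ext_getElem
  · simp
  · intro i h1 h2
    simp only [List.getElem_modify, List.getElem_map, List.getElem_range]
    by_cases hik : i = k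
    · subst hik; simp
    · rw [if_neg (by omega), if_neg hik]

theorem replicate_eq_map_range {α : Type} (H : Nat) (c : α) :
    List.replicate H c = (List.range H).map (fun _ => c) := by
  simp

theorem foldl_modifies {α : Type} (g : Nat → α → α) (c : α) (limit : Int) (h0 : 0 ≤ limit) :
    ∀ (m H : Nat), limit.toNat + m ≤ H →
      (List.range m).foldl (fun (s : List α) (j : Nat) => pyModifyAt s ((j : Int) + limit) (g j)) (List.replicate H c)
        = (List.range H).map
            (fun y => if limit.toNat ≤ y ∧ y < limit.toNat + m then g (y - limit.toNat) c else c) := by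
  intro m
  induction m with
  | zero =>
    intro H hH
    rw [replicate_eq_map_range]
    simp only [List.range_zero, List.foldl_nil]
    apply List.map_congr_left
    intro y hy
    rw [if_neg (by omega)]
  | succ m ih =>
    intro H hH
    rw [List.range_succ, List.foldl_append, ih H (by omega), List.foldl_cons, List.foldl_nil]
    have hlen : ((List.range H).map
        (fun y => if limit.toNat ≤ y ∧ y < limit.toNat + m then g (y - limit.toNat) c else c)).length = H := by
      simp
    rw [pyModifyAt_in _ _ _ (by omega) (by rw [hlen]; omega)]
    have htn : ((m : Int) + limit).toNat = m + limit.toNat := by omega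
    rw [htn, modify_map_range _ _ _ _ (by omega)]
    apply List.map_congr_left
    intro y hy
    simp only [List.mem_range] at hy
    by_cases h1 : y = m + limit.toNat
    · subst h1
      rw [if_pos rfl, if_neg (by omega), if_pos (by omega)]
      congr 1
      omega
    · rw [if_neg h1]
      by_cases h2 : limit.toNat ≤ y ∧ y < limit.toNat + m
      · rw [if_pos h2, if_pos (by omega)]
      · rw [if_neg h2, if_neg (by omega)]

theorem map_range_const {α : Type} (H : Nat) (f : Nat → α) (c : α)
    (h : ∀ y, y < H → f y = c) : (List.range H).map f = List.replicate H c := by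
  rw [replicate_eq_map_range]
  exact List.map_congr_left (fun y hy => h y (List.mem_range.mp hy))

theorem set_replicate {α : Type} (H k : Nat) (c v : α) (hk : k < H) :
    (List.replicate H c).set k v = (List.range H).map (fun w => if w = k then v else c) := by
  apply List.ext_getElem
  · simp
  · intro i h1 h2
    simp only [List.getElem_set, List.getElem_replicate, List.getElem_map, List.getElem_range]
    by_cases hik : i = k
    · subst hik; simp
    · rw [if_neg (by omega), if_neg hik]

theorem modify_replicate {α : Type} (H k : Nat) (c : α) (g : α → α) (hk : k < H) :
    (List.replicate H c).modify k g = (List.range H).map (fun y => if y = k then g c else c) := by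
  rw [replicate_eq_map_range, modify_map_range _ _ _ _ hk]

-- splitting a map over range (a+n+b) into three blocks
theorem map_range_split {α : Type} (a n b : Nat) (f : Nat → α) :
    (List.range (a + n + b)).map f
      = (List.range a).map f ++ (List.range n).map (fun j => f (a + j))
        ++ (List.range b).map (fun i => f (a + n + i)) := by
  rw [show a + n + b = a + (n + b) by omega, List.range_add, List.map_append, List.map_map,
    List.range_add, List.map_append, List.map_map]
  simp only [Function.comp_def, List.append_assoc]
  refine congrArg _ (congrArg _ ?_)
  refine List.map_congr_left fun i _ => ?_
  exact congrArg f (by omega)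


-- a map over a list as a map over the range of its indices (via getD)
theorem map_eq_map_range_getD {α β : Type} (l : List α) (d : α) (f : α → β) :
    l.map f = (List.range l.length).map (fun j => f (l.getD j d)) := by
  apply List.ext_getElem
  · simp
  · intro i h1 h2
    simp only [List.getElem_map, List.getElem_range]
    congr 1
    rw [List.getD_eq_getElem l d (by simpa using h2)]

-- common normal form of both ports (for a nonempty grid and 0 ≤ limit)
def NF (g0 : List String) (gs : List (List String)) (limit : Int) : List (List (List (List String))) :=
  (List.range ((((g0::gs).length : Int) + 2*limit).toNat)).map (fun y =>
    (List.range (((g0.length : Int) + 2*limit).toNat)).map (fun x =>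
      (List.range ((1+2*limit).toNat)).map (fun _z =>
        (List.range ((1+2*limit).toNat)).map (fun _w =>
          if limit.toNat ≤ y ∧ y < limit.toNat + (g0::gs).length ∧
             limit.toNat ≤ x ∧ x < limit.toNat + g0.length ∧ _z = limit.toNat ∧ _w = limit.toNat
          then ((g0::gs).getD (y - limit.toNat) []).getD (x - limit.toNat) "."
          else "."))))

theorem portA_norm (g0 : List String) (gs : List (List String)) (limit : Int) (h0 : 0 ≤ limit) :
    generate_space (g0::gs) limit = NF g0 gs limit := by
  simp only [generate_space, PySem.List.pyGet?_zero_cons, NF, PySem.List.pyRange_one,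
    List.foldl_map, List.map_map, sub_zero, zero_add, Int.toNat_natCast]
  simp only [Function.comp_def]
  simp only [← replicate_eq_map_range]
  simp only [foldl_pyModifyAt]
  rw [foldl_modifies _ _ limit h0 _ _ (by omega)]
  refine List.map_congr_left fun y hy => ?_
  by_cases hy2 : limit.toNat ≤ y ∧ y < limit.toNat + (g0 :: gs).length
  · rw [if_pos hy2]
    rw [foldl_modifies _ _ limit h0 _ _ (by omega)]
    refine List.map_congr_left fun x hx => ?_
    by_cases hx2 : limit.toNat ≤ x ∧ x < limit.toNat + g0.length
    · rw [if_pos hx2]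
      rw [pyModifyAt_in _ _ _ h0 (by simp only [List.length_replicate]; omega)]
      rw [modify_replicate _ _ _ _ (by omega)]
      refine List.map_congr_left fun z hz => ?_
      by_cases hz2 : z = limit.toNat
      · rw [if_pos hz2]
        rw [PySem.List.pySetD_of_nonneg _ _ h0]
        rw [set_replicate _ _ _ _ (by omega)]
        refine List.map_congr_left fun w hw => ?_
        by_cases hw2 : w = limit.toNat
        · rw [if_pos hw2, if_pos ⟨hy2.1, hy2.2, hx2.1, hx2.2, hz2, hw2⟩,
            PySem.List.pyGetD_natCast, PySem.List.pyGetD_natCast]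
        · rw [if_neg hw2, if_neg (fun hc => hw2 hc.2.2.2.2.2)]
      · rw [if_neg hz2]
        exact (map_range_const _ _ _ (fun w hw => if_neg (fun hc => hz2 hc.2.2.2.2.1))).symm
    · rw [if_neg hx2]
      exact (map_range_const _ _ _ (fun z hz =>
        map_range_const _ _ _ (fun w hw =>
          if_neg (fun hc => hx2 ⟨hc.2.2.1, hc.2.2.2.1⟩)))).symm
  · rw [if_neg hy2]
    exact (map_range_const _ _ _ (fun x hx =>
      map_range_const _ _ _ (fun z hz =>
        map_range_const _ _ _ (fun w hw =>
          if_neg (fun hc => hy2 ⟨hc.1, hc.2.1⟩))))).symm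

theorem portB_norm (g0 : List String) (gs : List (List String)) (limit : Int) (h0 : 0 ≤ limit) :
    generate_space_alt (g0::gs) limit = NF g0 gs limit := by
  have hD : (1 + 2*limit).toNat = limit.toNat + 1 + limit.toNat := by omega
  have hW : (((g0.length : Nat) : Int) + 2*limit).toNat = limit.toNat + g0.length + limit.toNat := by omega
  have hH : ((((g0::gs).length : Nat) : Int) + 2*limit).toNat
      = limit.toNat + (g0::gs).length + limit.toNat := by omega
  simp only [generate_space_alt, PySem.List.pyGet?_zero_cons, NF]
  rw [hD, hW, hH, map_range_split limit.toNat (g0::gs).length limit.toNat]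
  congr 1
  · congr 1
    · -- top padding rows
      refine List.map_congr_left fun y hy => ?_
      have hy' := List.mem_range.mp hy
      refine List.map_congr_left fun x _ => ?_
      refine List.map_congr_left fun z _ => ?_
      exact (map_range_const _ _ _ (fun w _ =>
        if_neg (fun hc => by have := hc.1; omega))).symm
    · -- the grid rows
      rw [map_eq_map_range_getD (g0::gs) []]
      refine List.map_congr_left fun j hj => ?_
      have hj' := List.mem_range.mp hj
      rw [map_range_split limit.toNat g0.length limit.toNat]
      congr 1
      · congr 1
        · -- left padding columns
          refine List.map_congr_left fun x hx => ?_
          have hx' := List.mem_range.mp hx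
          refine List.map_congr_left fun z _ => ?_
          exact (map_range_const _ _ _ (fun w _ =>
            if_neg (fun hc => by have := hc.2.2.1; omega))).symm
        · -- the row's cells: one z/w slab per grid value
          refine List.map_congr_left fun i hi => ?_
          have hi' := List.mem_range.mp hi
          rw [show ∀ k : Nat, Int.ofNat k = (k : Int) from fun _ => rfl, PySem.List.pyGetD_natCast]
          rw [map_range_split limit.toNat 1 limit.toNat]
          congr 1
          · congr 1
            · -- front z padding of the slab
              refine List.map_congr_left fun z hz => ?_
              have hz' := List.mem_range.mp hz
              exact (map_range_const _ _ _ (fun w _ =>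
                if_neg (fun hc => by have := hc.2.2.2.2.1; omega))).symm
            · -- the central z line
              simp only [List.range_one, List.map_cons, List.map_nil, Nat.add_zero]
              congr 1
              rw [map_range_split limit.toNat 1 limit.toNat]
              congr 1
              · congr 1
                · -- "." * limit
                  exact ((map_range_const _ _ _ (fun w hw =>
                    if_neg (fun hc => by have := hc.2.2.2.2.2; omega)))).symm
                · -- the single central cell
                  simp only [List.range_one, List.map_cons, List.map_nil, Nat.add_zero]
                  congr 1
                  rw [if_pos ⟨by omega, by omega, by omega, by omega, trivial, trivial⟩]
                  simp only [Nat.add_sub_cancel_left]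
              · -- "." * limit
                exact (map_range_const _ _ _ (fun w _ =>
                  if_neg (fun hc => by have := hc.2.2.2.2.2; omega))).symm
          · -- back z padding of the slab
            refine List.map_congr_left fun z _ => ?_
            exact (map_range_const _ _ _ (fun w _ =>
              if_neg (fun hc => by have := hc.2.2.2.2.1; omega))).symm
      · -- right padding columns
        refine List.map_congr_left fun x _ => ?_
        refine List.map_congr_left fun z _ => ?_
        exact (map_range_const _ _ _ (fun w _ =>
          if_neg (fun hc => by have := hc.2.2.2.1; omega))).symm
  · -- bottom padding rows
    refine List.map_congr_left fun y _ => ?_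
    refine List.map_congr_left fun x _ => ?_
    refine List.map_congr_left fun z _ => ?_
    exact (map_range_const _ _ _ (fun w _ =>
      if_neg (fun hc => by have := hc.2.1; omega))).symm

-- ===== VERDICT (by name: the statement is the Claim_ definition above) =====
theorem generate_space_spec : Claim_equal_generate_space := by
  intro grid limit _dom hpre
  obtain ⟨hne, h0, _hrows⟩ := hpre
  unfold Spec_generate_space
  cases grid with
  | nil => exact absurd rfl hne
  | cons g0 gs => rw [portA_norm g0 gs limit h0, portB_norm g0 gs limit h0]
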